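-- pv_equiv track=rewrite | github.com/LukasJSvedberg/Rubix_Project_Repository | Board.py | dice_combinations
-- ===== SOURCE A (Python) =====
-- def lookup(move_type):
--     if move_type == 'L':
--         return 'R'
--     elif move_type == 'R':
--         return 'L'
--     elif move_type == 'U':
--         return 'D'
--     elif move_type == 'D':
--         return 'U'
--     if move_type == 'F':
--         return 'B'
--     elif move_type == 'B':
--         return 'F'
--
-- def dice_combinations(k, move_bucket):
--     memo = {}
--     if k == 1:
--         memo[1] = [(i,) for i in move_bucket]
--         return memo[1]
--
--     elif k in memo:
--         return memo[k]
--
--     else: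
--         prev_res = dice_combinations(k - 1, move_bucket)
--         res = []
--
--         for comb in prev_res:
--             for j in range(len(move_bucket)):
--                 if move_bucket[j][0] != comb[-1][0] and lookup(move_bucket[j][0]) != comb[-1][0]:
--                     res.append(comb + (move_bucket[j],))
--
--         memo[k] = res
--         return res
-- ===== SOURCE B (Python) =====
-- OPP = {'L': 'R', 'R': 'L', 'U': 'D', 'D': 'U', 'F': 'B', 'B': 'F'}
--
-- def dice_combinations(k, move_bucket):
--     res = [(m,) for m in move_bucket]
--     for _ in range(k - 1):
--         res = [comb + (m,) for comb in res for m in move_bucket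
--                if m[0] != comb[-1][0] and OPP.get(m[0]) != comb[-1][0]]
--     return res
-- ===== Notes on version B (the rewrite author's own statement) =====
-- stated objective: simpler
-- what changed: Replaces A's top-down recursion with useless per-call memo dict and index-based inner loop by a bottom-up iterative loop that rebuilds the combination list k-1 times with a single flat comprehension, using a precomputed opposite-face dict instead of the if/elif lookup chain.
import Mathlib
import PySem

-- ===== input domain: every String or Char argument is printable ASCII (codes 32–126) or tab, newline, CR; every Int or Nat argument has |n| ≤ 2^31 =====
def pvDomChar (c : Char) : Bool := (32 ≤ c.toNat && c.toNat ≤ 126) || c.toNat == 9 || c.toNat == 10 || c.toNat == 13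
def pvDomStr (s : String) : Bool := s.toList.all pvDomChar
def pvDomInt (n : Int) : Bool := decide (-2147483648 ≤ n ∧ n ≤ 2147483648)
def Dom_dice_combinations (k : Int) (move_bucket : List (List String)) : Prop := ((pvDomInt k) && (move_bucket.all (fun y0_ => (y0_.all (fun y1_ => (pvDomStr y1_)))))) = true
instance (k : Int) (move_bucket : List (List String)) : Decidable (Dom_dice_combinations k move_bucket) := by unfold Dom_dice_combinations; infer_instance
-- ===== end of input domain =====

-- B replaces A's top-down recursion (useless per-call memo dict, index-based inner loop,
-- if/elif lookup chain) by a bottom-up iterative rebuild with one flat comprehension and an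
-- opposite-face dict; objective: simpler.

-- ===== PORT A =====
-- Python `lookup`: if/elif chain, returns None on no match
def lookupA (t : String) : Option String :=
  if t == "L" then some "R"
  else if t == "R" then some "L"
  else if t == "U" then some "D"
  else if t == "D" then some "U"
  else if t == "F" then some "B"
  else if t == "B" then some "F"
  else none

-- `memo` in A is a fresh empty dict each call, so `elif k in memo` never holds; the k==1
-- branch stores and immediately returns memo[1]. The `| _, _ => res` arm of the match is
-- where Python's `move_bucket[j][0]` / `comb[-1][0]` raises IndexError (an empty move);
-- those inputs are excluded by Pre_.
def dice_combinations (k : Int) (move_bucket : List (List String)) : List (List (List String)) :=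
  if k = 1 then move_bucket.map (fun i => [i])
  else if _h : 1 < k then
    let prev_res := dice_combinations (k - 1) move_bucket
    prev_res.foldl (fun res comb =>
      (PySem.List.pyRange 0 (move_bucket.length : Int)).foldl (fun res j =>
        match PySem.List.pyGet? (PySem.List.pyGetD move_bucket j []) 0,
              (PySem.List.pyGet? comb (-1)).bind (fun c => PySem.List.pyGet? c 0) with
        | some a, some b =>
            if a ≠ b ∧ lookupA a ≠ some b then res ++ [comb ++ [PySem.List.pyGetD move_bucket j []]] else res
        | _, _ => res) res) []
  else []  -- k < 1: Python recurses with no base case (RecursionError); outside Pre_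
termination_by k.toNat
decreasing_by omega

-- ===== PORT B =====
def oppB : PySem.Dict String String :=
  PySem.Dict.ofList [("L","R"), ("R","L"), ("U","D"), ("D","U"), ("F","B"), ("B","F")]

-- B's filter test: m[0] != comb[-1][0] and OPP.get(m[0]) != comb[-1][0]
def condB (comb : List (List String)) (m : List String) : Bool :=
  match PySem.List.pyGet? m 0 with
  | none => false
  | some a =>
    match (PySem.List.pyGet? comb (-1)).bind (fun c => PySem.List.pyGet? c 0) with
    | none => false
    | some b => a != b && PySem.Dict.get? oppB a != some b

def dice_combinations_alt (k : Int) (move_bucket : List (List String)) : List (List (List String)) :=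
  let seed := move_bucket.map (fun m => [m])
  (List.range (k - 1).toNat).foldl (fun res _ =>
    res.flatMap (fun comb => (move_bucket.filter (condB comb)).map (fun m => comb ++ [m]))) seed

-- ===== PRECONDITION & SPEC =====
-- Pre_ excludes k < 1, where A recurses without reaching a base case (RecursionError), and
-- k ≥ 2 with an empty move in the bucket, where A's move_bucket[j][0] raises IndexError
-- (B raises the same IndexError on both regions' natural analogues: m[0] in its comprehension).
def Pre_dice_combinations (k : Int) (move_bucket : List (List String)) : Prop :=
  1 ≤ k ∧ (k = 1 ∨ ∀ m ∈ move_bucket, m ≠ [])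
instance (k : Int) (move_bucket : List (List String)) : Decidable (Pre_dice_combinations k move_bucket) := by unfold Pre_dice_combinations; infer_instance

def pvWitness_dice_combinations : Int × List (List String) := (3, [["L"], ["U"], ["F"]])

def Spec_dice_combinations (k : Int) (move_bucket : List (List String)) (out : List (List (List String))) : Prop := out = dice_combinations_alt k move_bucket
instance (k : Int) (move_bucket : List (List String)) (out : List (List (List String))) : Decidable (Spec_dice_combinations k move_bucket out) := by unfold Spec_dice_combinations; infer_instance

-- ===== CLAIM (what is proved, stated in full; the proofs are below) =====
def Claim_equal_dice_combinations : Prop := ∀ (k : Int) (move_bucket : List (List String)), Dom_dice_combinations k move_bucket → Pre_dice_combinations k move_bucket → Spec_dice_combinations k move_bucket (dice_combinations k move_bucket)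

-- ===== LEMMAS AND PROOFS =====

lemma oppB_mk : oppB = PySem.Dict.mk [("L","R"), ("R","L"), ("U","D"), ("D","U"), ("F","B"), ("B","F")] := by
  decide

-- A's if/elif lookup chain computes B's dict lookup
lemma lookupA_eq_dict (a : String) : lookupA a = PySem.Dict.get? oppB a := by
  rw [oppB_mk]
  simp only [lookupA]
  split_ifs <;> simp_all [PySem.Dict.get?]
  simp_all [eq_comm]

-- B's one step, named for the proof (definitionally B's loop body)
def stepB (move_bucket : List (List String)) (res : List (List (List String))) : List (List (List String)) :=
  res.flatMap (fun comb => (move_bucket.filter (condB comb)).map (fun m => comb ++ [m]))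

lemma matchHelper (x y : Option String) (res : List (List (List String)))
    (comb : List (List String)) (m : List String) :
    (match x, y with
      | some a, some b =>
          if a ≠ b ∧ lookupA a ≠ some b then res ++ [comb ++ [m]] else res
      | _, _ => res)
    = if (match x with
        | none => false
        | some a =>
          match y with
          | none => false
          | some b => a != b && PySem.Dict.get? oppB a != some b) then res ++ [comb ++ [m]] else res := by
  cases x with
  | none => simp
  | some a =>
    cases y with
    | none => simp
    | some b =>
      simp only [lookupA_eq_dict]
      by_cases hab : a = b <;> by_cases hl : PySem.Dict.get? oppB a = some b <;>
        simp [hab, hl]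

-- A's per-comb body is an `if condB` append
lemma bodyA_eq (comb : List (List String)) :
    (fun (res : List (List (List String))) (mj : List String) =>
      match PySem.List.pyGet? mj 0,
            (PySem.List.pyGet? comb (-1)).bind (fun c => PySem.List.pyGet? c 0) with
      | some a, some b =>
          if a ≠ b ∧ lookupA a ≠ some b then res ++ [comb ++ [mj]] else res
      | _, _ => res)
    = fun res m => if condB comb m then res ++ [comb ++ [m]] else res := by
  funext res m
  simp only [condB]
  exact matchHelper _ _ res comb m

-- A's double loop for one level equals B's step
lemma outer_eq (move_bucket : List (List String)) (prev : List (List (List String))) :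
    prev.foldl (fun res comb =>
      (PySem.List.pyRange 0 (move_bucket.length : Int)).foldl (fun res j =>
        match PySem.List.pyGet? (PySem.List.pyGetD move_bucket j []) 0,
              (PySem.List.pyGet? comb (-1)).bind (fun c => PySem.List.pyGet? c 0) with
        | some a, some b =>
            if a ≠ b ∧ lookupA a ≠ some b then res ++ [comb ++ [PySem.List.pyGetD move_bucket j []]] else res
        | _, _ => res) res) []
    = stepB move_bucket prev := by
  have hinner : ∀ (comb : List (List String)) (res : List (List (List String))),
      (PySem.List.pyRange 0 (move_bucket.length : Int)).foldl (fun res j =>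
        match PySem.List.pyGet? (PySem.List.pyGetD move_bucket j []) 0,
              (PySem.List.pyGet? comb (-1)).bind (fun c => PySem.List.pyGet? c 0) with
        | some a, some b =>
            if a ≠ b ∧ lookupA a ≠ some b then res ++ [comb ++ [PySem.List.pyGetD move_bucket j []]] else res
        | _, _ => res) res
      = res ++ (move_bucket.filter (condB comb)).map (fun m => comb ++ [m]) := by
    intro comb res
    have h0 := PySem.List.foldl_pyRange_zero_pyGetD' move_bucket []
      (fun res mj =>
        match PySem.List.pyGet? mj 0,
              (PySem.List.pyGet? comb (-1)).bind (fun c => PySem.List.pyGet? c 0) with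
        | some a, some b =>
            if a ≠ b ∧ lookupA a ≠ some b then res ++ [comb ++ [mj]] else res
        | _, _ => res) res
    refine h0.trans ?_
    rw [bodyA_eq comb, PySem.List.foldl_append_if]
  have hfun : (fun (res : List (List (List String))) (comb : List (List String)) =>
      (PySem.List.pyRange 0 (move_bucket.length : Int)).foldl (fun res j =>
        match PySem.List.pyGet? (PySem.List.pyGetD move_bucket j []) 0,
              (PySem.List.pyGet? comb (-1)).bind (fun c => PySem.List.pyGet? c 0) with
        | some a, some b =>
            if a ≠ b ∧ lookupA a ≠ some b then res ++ [comb ++ [PySem.List.pyGetD move_bucket j []]] else res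
        | _, _ => res) res)
      = fun res comb => res ++ (move_bucket.filter (condB comb)).map (fun m => comb ++ [m]) := by
    funext res comb
    exact hinner comb res
  rw [hfun, PySem.List.foldl_append_eq_flatMap]
  rfl

lemma altFold (move_bucket : List (List String)) (n : Nat) :
    (List.range (n + 1)).foldl (fun res _ => stepB move_bucket res) (move_bucket.map (fun m => [m]))
    = stepB move_bucket ((List.range n).foldl (fun res _ => stepB move_bucket res) (move_bucket.map (fun m => [m]))) := by
  rw [List.range_succ, List.foldl_append]
  rfl

lemma main_eq (n : Nat) (k : Int) (hk : k = (n : Int) + 1) (move_bucket : List (List String)) :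
    dice_combinations k move_bucket = dice_combinations_alt k move_bucket := by
  induction n generalizing k with
  | zero =>
    subst hk
    simp [dice_combinations, dice_combinations_alt]
  | succ m ih =>
    subst hk
    have h1 : ¬ (((m + 1 : Nat) : Int) + 1 = 1) := by omega
    have h2 : (1 : Int) < ((m + 1 : Nat) : Int) + 1 := by omega
    rw [dice_combinations, if_neg h1, dif_pos h2, outer_eq]
    have hrec : ((m + 1 : Nat) : Int) + 1 - 1 = (m : Int) + 1 := by push_cast; ring
    rw [hrec, ih _ rfl]
    show stepB move_bucket (dice_combinations_alt ((m : Int) + 1) move_bucket) = _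
    have e1 : (((m : Int) + 1) - 1).toNat = m := by omega
    have e2 : ((((m + 1 : Nat) : Int) + 1) - 1).toNat = m + 1 := by omega
    unfold dice_combinations_alt
    simp only [e1, e2]
    exact (altFold move_bucket m).symm

-- ===== VERDICT (by name: the statement is the Claim_ definition above) =====
theorem dice_combinations_spec : Claim_equal_dice_combinations := by
  intro k mb _ hpre
  obtain ⟨hk, -⟩ := hpre
  obtain ⟨n, hn⟩ : ∃ n : Nat, k = (n : Int) + 1 := ⟨(k - 1).toNat, by omega⟩
  exact main_eq n k hn mb
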